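-- pv_equiv track=rewrite | github.com/ArashMozhdehi-1/dispatch-db | Frontrunner/scripts/create_location_geometries.py | categorize_location
-- ===== SOURCE A (Python) =====
-- def categorize_location(location_name: str, location_type: str) -> str:
--     """Categorize location into functional groups"""
--     if location_type == 'dump_node':
--         return 'Dump Areas'
--     if location_type == 'travel_destination':
--         return 'Travel Routes'
--
--     name = location_name.upper() if location_name else ''
--
--     # Crusher-related locations
--     if 'CRUSH' in name or name in ['C2', 'C3']:
--         return 'Crusher Operations'
--
--     # Intersection locations
--     if location_type == 'pit_loc_intersection' or 'INTERSECTION' in name: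
--         return 'Road Intersections'
--
--     # Fuel and service areas
--     if any(word in name for word in ['FUEL', 'SERVICE', 'REFUEL']):
--         return 'Fuel & Service'
--
--     # Gates
--     if 'GATE' in name:
--         return 'Gates'
--
--     # Access points
--     if any(word in name for word in ['ENTRY', 'EXIT', 'ACCESS']):
--         return 'Access Points'
--
--     # Tiedown and parking bays
--     if location_type == 'pit_loc_tiedown' or any(word in name for word in ['BAY', 'BYPASS', 'PARK']):
--         return 'Parking & Tiedown'
--
--     # Blast areas
--     if any(word in name for word in ['BLAST', 'EXPLOSIVE']):
--         return 'Blast Areas'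
--
--     # Workshop and maintenance
--     if any(word in name for word in ['WORKSHOP', 'MAINT', 'REPAIR']):
--         return 'Workshop & Maintenance'
--
--     # Mixed and general pit locations
--     if location_type == 'pit_loc_mixed' or name.replace('_', '').replace('-', '').isalnum():
--         return 'Pit Locations'
--
--     return 'Other Locations'
-- ===== SOURCE B (Python) =====
-- TYPE_CATS = {
--     'dump_node': (0, 'Dump Areas'),
--     'travel_destination': (1, 'Travel Routes'),
--     'pit_loc_intersection': (3, 'Road Intersections'),
--     'pit_loc_tiedown': (7, 'Parking & Tiedown'),
--     'pit_loc_mixed': (10, 'Pit Locations'),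
-- }
--
-- KEYWORD_CATS = {
--     'CRUSH': (2, 'Crusher Operations'),
--     'INTERSECTION': (3, 'Road Intersections'),
--     'FUEL': (4, 'Fuel & Service'),
--     'SERVICE': (4, 'Fuel & Service'),
--     'REFUEL': (4, 'Fuel & Service'),
--     'GATE': (5, 'Gates'),
--     'ENTRY': (6, 'Access Points'),
--     'EXIT': (6, 'Access Points'),
--     'ACCESS': (6, 'Access Points'),
--     'BAY': (7, 'Parking & Tiedown'),
--     'BYPASS': (7, 'Parking & Tiedown'),
--     'PARK': (7, 'Parking & Tiedown'),
--     'BLAST': (8, 'Blast Areas'),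
--     'EXPLOSIVE': (8, 'Blast Areas'),
--     'WORKSHOP': (9, 'Workshop & Maintenance'),
--     'MAINT': (9, 'Workshop & Maintenance'),
--     'REPAIR': (9, 'Workshop & Maintenance'),
-- }
--
--
-- def categorize_location(location_name: str, location_type: str) -> str:
--     """Categorize location into functional groups.
--
--     Collects every matching (priority, category) candidate from keyword and
--     type tables, then returns the category of minimum priority."""
--     name = location_name.upper() if location_name else ''
--     candidates = []
--     if location_type in TYPE_CATS:
--         candidates.append(TYPE_CATS[location_type])
--     for word, pc in KEYWORD_CATS.items():
--         if word in name:
--             candidates.append(pc)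
--     if name in ('C2', 'C3'):
--         candidates.append((2, 'Crusher Operations'))
--     if name.replace('_', '').replace('-', '').isalnum():
--         candidates.append((10, 'Pit Locations'))
--     if not candidates:
--         return 'Other Locations'
--     return min(candidates, key=lambda pc: pc[0])[1]
-- ===== Notes on version B (the rewrite author's own statement) =====
-- stated objective: alternative
-- what changed: Replaced the ordered if-cascade by a collect-then-select algorithm: keyword and type tables map each trigger to a (priority, category) pair, all matching candidates are gathered without short-circuiting, and the category of minimum priority is returned (correct because the cascade's first true branch is exactly the matched condition of least priority).
import Mathlib
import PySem

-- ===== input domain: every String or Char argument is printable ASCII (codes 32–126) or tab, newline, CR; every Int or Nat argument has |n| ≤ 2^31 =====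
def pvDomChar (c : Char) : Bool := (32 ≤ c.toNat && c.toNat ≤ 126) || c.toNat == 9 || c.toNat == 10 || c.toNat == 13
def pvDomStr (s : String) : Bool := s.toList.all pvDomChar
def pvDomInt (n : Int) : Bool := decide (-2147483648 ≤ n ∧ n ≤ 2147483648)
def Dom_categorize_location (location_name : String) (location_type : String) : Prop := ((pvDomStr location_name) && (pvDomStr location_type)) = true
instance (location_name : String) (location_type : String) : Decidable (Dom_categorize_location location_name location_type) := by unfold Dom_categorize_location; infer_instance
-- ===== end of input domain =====

-- B replaces A's if-cascade by collect-all-candidates-then-pick-min-priority over keyword/type tables (alternative; same cost).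

-- ===== PORT A =====
-- literal transliteration of A's cascade of if/return statements
def categorize_location (location_name : String) (location_type : String) : String :=
  if location_type == "dump_node" then "Dump Areas"
  else if location_type == "travel_destination" then "Travel Routes"
  else
    let name := if location_name ≠ "" then PySem.Str.upper location_name else ""
    if PySem.Str.isIn "CRUSH" name || (name == "C2" || name == "C3") then "Crusher Operations"
    else if location_type == "pit_loc_intersection" || PySem.Str.isIn "INTERSECTION" name then "Road Intersections"
    else if ["FUEL", "SERVICE", "REFUEL"].any (fun w => PySem.Str.isIn w name) then "Fuel & Service"
    else if PySem.Str.isIn "GATE" name then "Gates"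
    else if ["ENTRY", "EXIT", "ACCESS"].any (fun w => PySem.Str.isIn w name) then "Access Points"
    else if location_type == "pit_loc_tiedown" || ["BAY", "BYPASS", "PARK"].any (fun w => PySem.Str.isIn w name) then "Parking & Tiedown"
    else if ["BLAST", "EXPLOSIVE"].any (fun w => PySem.Str.isIn w name) then "Blast Areas"
    else if ["WORKSHOP", "MAINT", "REPAIR"].any (fun w => PySem.Str.isIn w name) then "Workshop & Maintenance"
    else if location_type == "pit_loc_mixed" || PySem.Str.strIsalnum (PySem.Str.replace (PySem.Str.replace name "_" "") "-" "") then "Pit Locations"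
    else "Other Locations"

-- ===== PORT B =====
-- the two module-level tables of Source B (dicts ported as association lists, lookup = first match)
def pvTypeCats : List (String × (Int × String)) :=
  [("dump_node", (0, "Dump Areas")),
   ("travel_destination", (1, "Travel Routes")),
   ("pit_loc_intersection", (3, "Road Intersections")),
   ("pit_loc_tiedown", (7, "Parking & Tiedown")),
   ("pit_loc_mixed", (10, "Pit Locations"))]

def pvKeywordCats : List (String × (Int × String)) :=
  [("CRUSH", (2, "Crusher Operations")),
   ("INTERSECTION", (3, "Road Intersections")),
   ("FUEL", (4, "Fuel & Service")),
   ("SERVICE", (4, "Fuel & Service")),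
   ("REFUEL", (4, "Fuel & Service")),
   ("GATE", (5, "Gates")),
   ("ENTRY", (6, "Access Points")),
   ("EXIT", (6, "Access Points")),
   ("ACCESS", (6, "Access Points")),
   ("BAY", (7, "Parking & Tiedown")),
   ("BYPASS", (7, "Parking & Tiedown")),
   ("PARK", (7, "Parking & Tiedown")),
   ("BLAST", (8, "Blast Areas")),
   ("EXPLOSIVE", (8, "Blast Areas")),
   ("WORKSHOP", (9, "Workshop & Maintenance")),
   ("MAINT", (9, "Workshop & Maintenance")),
   ("REPAIR", (9, "Workshop & Maintenance"))]

-- the candidate-collection phase of Source B: the four append steps, in order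
def pvCandidates (name location_type : String) : List (Int × String) :=
  let c1 : List (Int × String) :=
    match pvTypeCats.lookup location_type with
    | some pc => [pc]
    | none => []
  let c2 := pvKeywordCats.foldl (fun acc wpc => if PySem.Str.isIn wpc.1 name then acc ++ [wpc.2] else acc) c1
  let c3 := if name == "C2" || name == "C3" then c2 ++ [(2, "Crusher Operations")] else c2
  if PySem.Str.strIsalnum (PySem.Str.replace (PySem.Str.replace name "_" "") "-" "") then c3 ++ [(10, "Pit Locations")] else c3

def categorize_location_alt (location_name : String) (location_type : String) : String :=
  let name := if location_name ≠ "" then PySem.Str.upper location_name else ""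
  match PySem.List.min? (pvCandidates name location_type) (fun pc => pc.1) with
  | none => "Other Locations"          -- 'if not candidates: return ...' (min? = none ↔ empty list)
  | some m => m.2                      -- min(candidates, key=lambda pc: pc[0])[1]

-- ===== PRECONDITION & SPEC =====
def Spec_categorize_location (location_name : String) (location_type : String) (out : String) : Prop := out = categorize_location_alt location_name location_type
instance (location_name : String) (location_type : String) (out : String) : Decidable (Spec_categorize_location location_name location_type out) := by unfold Spec_categorize_location; infer_instance

-- ===== CLAIM (what is proved, stated in full; the proofs are below) =====
def Claim_equal_categorize_location : Prop := ∀ (location_name : String) (location_type : String), Dom_categorize_location location_name location_type → Spec_categorize_location location_name location_type (categorize_location location_name location_type)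

-- ===== LEMMAS AND PROOFS =====

-- proof-side view: A's grouped condition of priority i, and the category of priority i
def pvCond (name t : String) (i : Int) : Bool :=
  if i = 0 then t == "dump_node"
  else if i = 1 then t == "travel_destination"
  else if i = 2 then PySem.Str.isIn "CRUSH" name || (name == "C2" || name == "C3")
  else if i = 3 then t == "pit_loc_intersection" || PySem.Str.isIn "INTERSECTION" name
  else if i = 4 then ["FUEL", "SERVICE", "REFUEL"].any (fun w => PySem.Str.isIn w name)
  else if i = 5 then PySem.Str.isIn "GATE" name
  else if i = 6 then ["ENTRY", "EXIT", "ACCESS"].any (fun w => PySem.Str.isIn w name)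
  else if i = 7 then t == "pit_loc_tiedown" || ["BAY", "BYPASS", "PARK"].any (fun w => PySem.Str.isIn w name)
  else if i = 8 then ["BLAST", "EXPLOSIVE"].any (fun w => PySem.Str.isIn w name)
  else if i = 9 then ["WORKSHOP", "MAINT", "REPAIR"].any (fun w => PySem.Str.isIn w name)
  else if i = 10 then t == "pit_loc_mixed" || PySem.Str.strIsalnum (PySem.Str.replace (PySem.Str.replace name "_" "") "-" "")
  else false

def pvCat (i : Int) : String :=
  if i = 0 then "Dump Areas"
  else if i = 1 then "Travel Routes"
  else if i = 2 then "Crusher Operations"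
  else if i = 3 then "Road Intersections"
  else if i = 4 then "Fuel & Service"
  else if i = 5 then "Gates"
  else if i = 6 then "Access Points"
  else if i = 7 then "Parking & Tiedown"
  else if i = 8 then "Blast Areas"
  else if i = 9 then "Workshop & Maintenance"
  else if i = 10 then "Pit Locations"
  else "Other Locations"

theorem pvCandidates_eq (name t : String) : pvCandidates name t =
    (match pvTypeCats.lookup t with | some pc => [pc] | none => [])
    ++ (pvKeywordCats.filter (fun wpc => PySem.Str.isIn wpc.1 name)).map (·.2)
    ++ (if name == "C2" || name == "C3" then [(2, "Crusher Operations")] else [])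
    ++ (if PySem.Str.strIsalnum (PySem.Str.replace (PySem.Str.replace name "_" "") "-" "") then [(10, "Pit Locations")] else []) := by
  simp only [pvCandidates, PySem.List.foldl_append_if]
  split_ifs <;> simp

theorem pv_lookup_cases (t : String) (x : Int × String) (h : pvTypeCats.lookup t = some x) :
    (t = "dump_node" ∧ x = (0, "Dump Areas")) ∨ (t = "travel_destination" ∧ x = (1, "Travel Routes")) ∨
    (t = "pit_loc_intersection" ∧ x = (3, "Road Intersections")) ∨ (t = "pit_loc_tiedown" ∧ x = (7, "Parking & Tiedown")) ∨
    (t = "pit_loc_mixed" ∧ x = (10, "Pit Locations")) := by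
  simp only [pvTypeCats, List.lookup] at h
  split at h
  · simp_all
  split at h
  · simp_all
  split at h
  · simp_all
  split at h
  · simp_all
  split at h
  · simp_all
  · simp_all

theorem pv_mem_candidates (name t : String) (x : Int × String) (hx : x ∈ pvCandidates name t) :
    0 ≤ x.1 ∧ x.1 ≤ 10 ∧ pvCond name t x.1 = true ∧ x.2 = pvCat x.1 := by
  rw [pvCandidates_eq] at hx
  simp only [List.mem_append] at hx
  rcases hx with ((h | h) | h) | h
  · cases hl : pvTypeCats.lookup t with
    | none => rw [hl] at h; simp at h
    | some pc =>
        rw [hl] at h; simp at h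
        rcases pv_lookup_cases t pc hl with ⟨ht, hp⟩ | ⟨ht, hp⟩ | ⟨ht, hp⟩ | ⟨ht, hp⟩ | ⟨ht, hp⟩ <;>
          subst ht <;> simp [h, hp, pvCond, pvCat]
  · simp only [pvKeywordCats, List.mem_map, List.mem_filter, List.mem_cons, List.not_mem_nil] at h
    obtain ⟨a, ⟨hmem, hin⟩, rfl⟩ := h
    rcases hmem with rfl | rfl | rfl | rfl | rfl | rfl | rfl | rfl | rfl | rfl | rfl | rfl | rfl | rfl | rfl | rfl | rfl | hfalse <;>
      simp_all [pvCond, pvCat]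
  · split at h <;> simp_all [pvCond, pvCat]
  · split at h <;> simp_all [pvCond, pvCat]

theorem pv_cond_mem (name t : String) (k : Int) (h0 : 0 ≤ k) (h10 : k ≤ 10)
    (hk : pvCond name t k = true) : ∃ x ∈ pvCandidates name t, x.1 = k := by
  rw [pvCandidates_eq]
  interval_cases k <;> simp only [pvCond, if_true] at hk <;> simp at hk
  · exact ⟨(0, "Dump Areas"), by simp [pvTypeCats, hk], rfl⟩
  · exact ⟨(1, "Travel Routes"), by simp [pvTypeCats, List.lookup, hk], rfl⟩
  · rcases hk with h | h | h
    · exact ⟨(2, "Crusher Operations"), by simp [pvKeywordCats, h], rfl⟩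
    · exact ⟨(2, "Crusher Operations"), by simp [h], rfl⟩
    · exact ⟨(2, "Crusher Operations"), by simp [h], rfl⟩
  · rcases hk with h | h
    · exact ⟨(3, "Road Intersections"), by simp [pvTypeCats, List.lookup, h], rfl⟩
    · exact ⟨(3, "Road Intersections"), by simp [pvKeywordCats, h], rfl⟩
  · rcases hk with h | h | h
    · exact ⟨(4, "Fuel & Service"), by simp [pvKeywordCats, h], rfl⟩
    · exact ⟨(4, "Fuel & Service"), by simp [pvKeywordCats, h], rfl⟩
    · exact ⟨(4, "Fuel & Service"), by simp [pvKeywordCats, h], rfl⟩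
  · exact ⟨(5, "Gates"), by simp [pvKeywordCats, hk], rfl⟩
  · rcases hk with h | h | h
    · exact ⟨(6, "Access Points"), by simp [pvKeywordCats, h], rfl⟩
    · exact ⟨(6, "Access Points"), by simp [pvKeywordCats, h], rfl⟩
    · exact ⟨(6, "Access Points"), by simp [pvKeywordCats, h], rfl⟩
  · rcases hk with h | h | h | h
    · exact ⟨(7, "Parking & Tiedown"), by simp [pvTypeCats, List.lookup, h], rfl⟩
    · exact ⟨(7, "Parking & Tiedown"), by simp [pvKeywordCats, h], rfl⟩
    · exact ⟨(7, "Parking & Tiedown"), by simp [pvKeywordCats, h], rfl⟩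
    · exact ⟨(7, "Parking & Tiedown"), by simp [pvKeywordCats, h], rfl⟩
  · rcases hk with h | h
    · exact ⟨(8, "Blast Areas"), by simp [pvKeywordCats, h], rfl⟩
    · exact ⟨(8, "Blast Areas"), by simp [pvKeywordCats, h], rfl⟩
  · rcases hk with h | h | h
    · exact ⟨(9, "Workshop & Maintenance"), by simp [pvKeywordCats, h], rfl⟩
    · exact ⟨(9, "Workshop & Maintenance"), by simp [pvKeywordCats, h], rfl⟩
    · exact ⟨(9, "Workshop & Maintenance"), by simp [pvKeywordCats, h], rfl⟩
  · rcases hk with h | h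
    · exact ⟨(10, "Pit Locations"), by simp [pvTypeCats, List.lookup, h], rfl⟩
    · exact ⟨(10, "Pit Locations"), by simp [h], rfl⟩

theorem pv_alt_eq (name t : String) (k : Int) (h0 : 0 ≤ k) (h10 : k ≤ 10)
    (hk : pvCond name t k = true)
    (hlt : ∀ j : Int, 0 ≤ j → j < k → pvCond name t j = false) :
    (match PySem.List.min? (pvCandidates name t) (fun pc => pc.1) with
     | none => "Other Locations"
     | some m => m.2) = pvCat k := by
  obtain ⟨x, hxmem, hxk⟩ := pv_cond_mem name t k h0 h10 hk
  cases hmin : PySem.List.min? (pvCandidates name t) (fun pc => pc.1) with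
  | none =>
      rw [PySem.List.min?_eq_none_iff] at hmin
      rw [hmin] at hxmem; cases hxmem
  | some m =>
      have hmmem := PySem.List.min?_mem hmin
      have hmin_le := PySem.List.min?_isMin hmin x hxmem
      obtain ⟨hm0, hm10, hmcond, hmcat⟩ := pv_mem_candidates name t m hmmem
      have : m.1 = k := by
        rcases lt_or_ge m.1 k with hlt' | hge
        · exact absurd hmcond (by simp [hlt m.1 hm0 hlt'])
        · omega
      simp [hmcat, this]

theorem pv_alt_other (name t : String)
    (hall : ∀ j : Int, pvCond name t j = false) :
    (match PySem.List.min? (pvCandidates name t) (fun pc => pc.1) with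
     | none => "Other Locations"
     | some m => m.2) = "Other Locations" := by
  cases hmin : PySem.List.min? (pvCandidates name t) (fun pc => pc.1) with
  | none => rfl
  | some m =>
      have hmmem := PySem.List.min?_mem hmin
      obtain ⟨_, _, hmcond, _⟩ := pv_mem_candidates name t m hmmem
      rw [hall m.1] at hmcond; cases hmcond

set_option maxHeartbeats 2000000 in
theorem pv_main (name t : String) :
    (if t == "dump_node" then "Dump Areas"
     else if t == "travel_destination" then "Travel Routes"
     else if PySem.Str.isIn "CRUSH" name || (name == "C2" || name == "C3") then "Crusher Operations"
     else if t == "pit_loc_intersection" || PySem.Str.isIn "INTERSECTION" name then "Road Intersections"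
     else if ["FUEL", "SERVICE", "REFUEL"].any (fun w => PySem.Str.isIn w name) then "Fuel & Service"
     else if PySem.Str.isIn "GATE" name then "Gates"
     else if ["ENTRY", "EXIT", "ACCESS"].any (fun w => PySem.Str.isIn w name) then "Access Points"
     else if t == "pit_loc_tiedown" || ["BAY", "BYPASS", "PARK"].any (fun w => PySem.Str.isIn w name) then "Parking & Tiedown"
     else if ["BLAST", "EXPLOSIVE"].any (fun w => PySem.Str.isIn w name) then "Blast Areas"
     else if ["WORKSHOP", "MAINT", "REPAIR"].any (fun w => PySem.Str.isIn w name) then "Workshop & Maintenance"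
     else if t == "pit_loc_mixed" || PySem.Str.strIsalnum (PySem.Str.replace (PySem.Str.replace name "_" "") "-" "") then "Pit Locations"
     else "Other Locations") =
    (match PySem.List.min? (pvCandidates name t) (fun pc => pc.1) with
     | none => "Other Locations"
     | some m => m.2) := by
  by_cases h0 : t == "dump_node"
  · rw [if_pos h0, pv_alt_eq name t 0 (by norm_num) (by norm_num) (by simpa [pvCond] using h0)
      (fun j hj1 hj2 => absurd hj2 (by omega))]
    decide
  by_cases h1 : t == "travel_destination"
  · rw [if_neg h0]
    rw [if_pos h1, pv_alt_eq name t 1 (by norm_num) (by norm_num) (by simpa [pvCond] using h1)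
      (by intro j hj1 hj2; interval_cases j <;> · simp_all [pvCond])]
    decide
  by_cases h2 : PySem.Str.isIn "CRUSH" name || (name == "C2" || name == "C3")
  · rw [if_neg h0, if_neg h1]
    rw [if_pos h2, pv_alt_eq name t 2 (by norm_num) (by norm_num) (by simpa [pvCond] using h2)
      (by intro j hj1 hj2; interval_cases j <;> · simp_all [pvCond])]
    decide
  by_cases h3 : t == "pit_loc_intersection" || PySem.Str.isIn "INTERSECTION" name
  · rw [if_neg h0, if_neg h1, if_neg h2]
    rw [if_pos h3, pv_alt_eq name t 3 (by norm_num) (by norm_num) (by simpa [pvCond] using h3)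
      (by intro j hj1 hj2; interval_cases j <;> · simp_all [pvCond])]
    decide
  by_cases h4 : ["FUEL", "SERVICE", "REFUEL"].any (fun w => PySem.Str.isIn w name)
  · rw [if_neg h0, if_neg h1, if_neg h2, if_neg h3]
    rw [if_pos h4, pv_alt_eq name t 4 (by norm_num) (by norm_num) (by simpa [pvCond] using h4)
      (by intro j hj1 hj2; interval_cases j <;> · simp_all [pvCond])]
    decide
  by_cases h5 : PySem.Str.isIn "GATE" name
  · rw [if_neg h0, if_neg h1, if_neg h2, if_neg h3, if_neg h4]
    rw [if_pos h5, pv_alt_eq name t 5 (by norm_num) (by norm_num) (by simpa [pvCond] using h5)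
      (by intro j hj1 hj2; interval_cases j <;> · simp_all [pvCond])]
    decide
  by_cases h6 : ["ENTRY", "EXIT", "ACCESS"].any (fun w => PySem.Str.isIn w name)
  · rw [if_neg h0, if_neg h1, if_neg h2, if_neg h3, if_neg h4, if_neg h5]
    rw [if_pos h6, pv_alt_eq name t 6 (by norm_num) (by norm_num) (by simpa [pvCond] using h6)
      (by intro j hj1 hj2; interval_cases j <;> · simp_all [pvCond])]
    decide
  by_cases h7 : t == "pit_loc_tiedown" || ["BAY", "BYPASS", "PARK"].any (fun w => PySem.Str.isIn w name)
  · rw [if_neg h0, if_neg h1, if_neg h2, if_neg h3, if_neg h4, if_neg h5, if_neg h6]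
    rw [if_pos h7, pv_alt_eq name t 7 (by norm_num) (by norm_num) (by simpa [pvCond] using h7)
      (by intro j hj1 hj2; interval_cases j <;> · simp_all [pvCond])]
    decide
  by_cases h8 : ["BLAST", "EXPLOSIVE"].any (fun w => PySem.Str.isIn w name)
  · rw [if_neg h0, if_neg h1, if_neg h2, if_neg h3, if_neg h4, if_neg h5, if_neg h6, if_neg h7]
    rw [if_pos h8, pv_alt_eq name t 8 (by norm_num) (by norm_num) (by simpa [pvCond] using h8)
      (by intro j hj1 hj2; interval_cases j <;> · simp_all [pvCond])]
    decide
  by_cases h9 : ["WORKSHOP", "MAINT", "REPAIR"].any (fun w => PySem.Str.isIn w name)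
  · rw [if_neg h0, if_neg h1, if_neg h2, if_neg h3, if_neg h4, if_neg h5, if_neg h6, if_neg h7, if_neg h8]
    rw [if_pos h9, pv_alt_eq name t 9 (by norm_num) (by norm_num) (by simpa [pvCond] using h9)
      (by intro j hj1 hj2; interval_cases j <;> · simp_all [pvCond])]
    decide
  by_cases h10 : t == "pit_loc_mixed" || PySem.Str.strIsalnum (PySem.Str.replace (PySem.Str.replace name "_" "") "-" "")
  · rw [if_neg h0, if_neg h1, if_neg h2, if_neg h3, if_neg h4, if_neg h5, if_neg h6, if_neg h7, if_neg h8, if_neg h9]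
    rw [if_pos h10, pv_alt_eq name t 10 (by norm_num) (by norm_num) (by simpa [pvCond] using h10)
      (by intro j hj1 hj2; interval_cases j <;> · simp_all [pvCond])]
    decide
  · rw [if_neg h0, if_neg h1, if_neg h2, if_neg h3, if_neg h4, if_neg h5, if_neg h6, if_neg h7, if_neg h8, if_neg h9, if_neg h10,
      pv_alt_other name t (by intro j; simp only [pvCond]; split_ifs <;> simp_all)]

-- ===== VERDICT (by name: the statement is the Claim_ definition above) =====
theorem categorize_location_spec : Claim_equal_categorize_location := by
  intro location_name location_type _
  show categorize_location location_name location_type = categorize_location_alt location_name location_type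
  unfold categorize_location categorize_location_alt
  exact pv_main (if location_name ≠ "" then PySem.Str.upper location_name else "") location_type
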